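-- pv_equiv track=rewrite | github.com/weaveeducation/edx-platform | common/djangoapps/credo_modules/event_parser.py | update_course_and_student_properties
-- ===== SOURCE A (Python) =====
-- def pull_value_from_student_properties(key, properties):
--     key_updated = key.strip().lower()
--     new_value = None
--     new_properties = properties.copy()
--
--     tmp_properties = {}
--     for k in new_properties:
--         tmp_properties[k.strip().lower()] = k
--     for tk, tv in tmp_properties.items():
--         if tk == key_updated:
--             new_value = new_properties[tv].replace('+', '-') \
--                     .replace("\n", "").replace("\t", "").replace("\r", "")
--             del new_properties[tv]
--     return new_value, new_properties
--
-- def update_course_and_student_properties(course, student_properties):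
--     overload_items = {
--         'course': {
--             'value': course,
--             'props': ['course', 'courses', 'course_title', 'course title',
--                       'course_name', 'course name', 'coursename', 'othercourse']
--         },
--     }
--     for k in overload_items:
--         for prop in overload_items[k]['props']:
--             new_value, new_properties = pull_value_from_student_properties(prop, student_properties)
--             if new_value:
--                 overload_items[k]['value'], student_properties = new_value, new_properties
--
--     return overload_items['course']['value'], student_properties
-- ===== SOURCE B (Python) =====
-- PROPS = ['course', 'courses', 'course_title', 'course title',
--          'course_name', 'course name', 'coursename', 'othercourse']
--
-- def _clean(s):
--     return s.replace('+', '-').replace("\n", "").replace("\t", "").replace("\r", "")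
--
-- def update_course_and_student_properties(course, student_properties):
--     # one pass: remember, per matching normalized key, the last (key, value) entry
--     slots = {}
--     for k, v in student_properties.items():
--         nk = k.strip().lower()
--         if nk in PROPS:
--             slots[nk] = (k, v)
--     value = course
--     removed = set()
--     for p in PROPS:
--         if p in slots:
--             k, v = slots[p]
--             cv = _clean(v)
--             if cv:
--                 value = cv
--                 removed.add(k)
--     return value, {k: v for k, v in student_properties.items() if k not in removed}
-- ===== Notes on version B (the rewrite author's own statement) =====
-- stated objective: faster
-- what changed: B makes one pass over student_properties building a dict from each normalized key to its last matching (key, value) entry and then resolves the fixed 8-prop list against it with a removal set, instead of A's rebuilding of the full normalized-key map (and copying the dict) once per prop name; Pre_ only excludes association lists with duplicate keys, which no Python dict argument can produce.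
import Mathlib
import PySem

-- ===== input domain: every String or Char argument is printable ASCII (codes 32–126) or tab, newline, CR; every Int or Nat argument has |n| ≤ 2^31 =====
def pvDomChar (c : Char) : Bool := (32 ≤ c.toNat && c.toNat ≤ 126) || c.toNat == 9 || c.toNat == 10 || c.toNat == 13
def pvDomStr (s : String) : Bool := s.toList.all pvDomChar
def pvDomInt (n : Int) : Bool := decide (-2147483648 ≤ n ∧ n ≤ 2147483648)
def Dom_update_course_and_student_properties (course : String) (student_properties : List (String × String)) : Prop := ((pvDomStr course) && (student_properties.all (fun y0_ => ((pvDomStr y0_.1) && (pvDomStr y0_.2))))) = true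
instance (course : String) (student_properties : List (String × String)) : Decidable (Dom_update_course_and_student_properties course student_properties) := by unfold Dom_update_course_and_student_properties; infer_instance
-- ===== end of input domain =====

-- B builds the case-insensitive index of matching keys in ONE pass over the properties and
-- resolves the fixed prop list against it, instead of A's rebuilding the whole normalized-key
-- map once per prop name (objective: a single-pass algorithm, constant-factor faster; return value unchanged).


-- ===== PORT A =====
-- shared by both ports: v.replace('+','-').replace('\n','').replace('\t','').replace('\r','')
def pvClean (s : String) : String :=
  PySem.Str.replace (PySem.Str.replace (PySem.Str.replace (PySem.Str.replace s "+" "-") "\n" "") "\t" "") "\r" ""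

-- shared by both ports: k.strip().lower()
def pvNorm (s : String) : String := PySem.Str.lower (PySem.Str.strip s)

def pull_value_from_student_properties (key : String) (properties : List (String × String)) :
    Option String × List (String × String) :=
  let key_updated := pvNorm key
  let new_properties : PySem.Dict String String := PySem.Dict.mk properties
  let tmp_properties : PySem.Dict String String :=
    (PySem.Dict.keys new_properties).foldl (fun d k => d.insert (pvNorm k) k) (PySem.Dict.mk [])
  let r :=
    tmp_properties.items.foldl
      (fun (st : Option String × PySem.Dict String String) tkv =>
        if tkv.1 == key_updated then
          (some (pvClean ((st.2.get? tkv.2).getD "")), st.2.erase tkv.2)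
        else st)
      (none, new_properties)
  (r.1, r.2.items)

def update_course_and_student_properties (course : String) (student_properties : List (String × String)) : String × (List (String × String)) :=
  let props : List String := ["course", "courses", "course_title", "course title",
                              "course_name", "course name", "coursename", "othercourse"]
  props.foldl
    (fun (st : String × List (String × String)) prop =>
      let res := pull_value_from_student_properties prop st.2
      match res.1 with
      | some nv => if nv ≠ "" then (nv, res.2) else st
      | none => st)
    (course, student_properties)

def pvPropsB : List String := ["course", "courses", "course_title", "course title",
                               "course_name", "course name", "coursename", "othercourse"]

def update_course_and_student_properties_alt (course : String) (student_properties : List (String × String)) : String × (List (String × String)) :=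
  let slots : PySem.Dict String (String × String) :=
    student_properties.foldl
      (fun d kv =>
        let nk := pvNorm kv.1
        if pvPropsB.contains nk then d.insert nk kv else d)
      (PySem.Dict.mk [])
  let r :=
    pvPropsB.foldl
      (fun (acc : String × PySem.Set String) p =>
        match slots.get? p with
        | some kv =>
            let cv := pvClean kv.2
            if cv ≠ "" then (cv, PySem.Set.add acc.2 kv.1) else acc
        | none => acc)
      (course, PySem.Set.ofList [])
  (r.1, student_properties.filter (fun kv => !(PySem.Set.contains r.2 kv.1)))

-- ===== PRECONDITION & SPEC =====
-- Pre_ excludes association lists with duplicate keys: the Python parameter is a dict, which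
-- cannot carry duplicate keys, so those lists encode no Python input at all.
def Pre_update_course_and_student_properties (course : String) (student_properties : List (String × String)) : Prop :=
  (student_properties.map Prod.fst).Nodup

instance (course : String) (student_properties : List (String × String)) : Decidable (Pre_update_course_and_student_properties course student_properties) := by unfold Pre_update_course_and_student_properties; infer_instance

def pvWitness_update_course_and_student_properties : String × (List (String × String)) :=
  ("base", [("Course ", "Math+101"), ("term", "fall"), ("COURSE", "")])

def Spec_update_course_and_student_properties (course : String) (student_properties : List (String × String)) (out : String × (List (String × String))) : Prop := out = update_course_and_student_properties_alt course student_properties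
instance (course : String) (student_properties : List (String × String)) (out : String × (List (String × String))) : Decidable (Spec_update_course_and_student_properties course student_properties out) := by unfold Spec_update_course_and_student_properties; infer_instance

-- ===== CLAIM (what is proved, stated in full; the proofs are below) =====
def Claim_equal_update_course_and_student_properties : Prop := ∀ (course : String) (student_properties : List (String × String)), Dom_update_course_and_student_properties course student_properties → Pre_update_course_and_student_properties course student_properties → Spec_update_course_and_student_properties course student_properties (update_course_and_student_properties course student_properties)

-- ===== LEMMAS AND PROOFS =====

def pvRep (q : String) (l : List (String × String)) : Option (String × String) :=
  (l.filter (fun kv => pvNorm kv.1 == q)).getLast?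

theorem pv_get?_foldl_insert {α ν : Type} (key : α → String) (val : α → ν)
    (c : α → Bool) (l : List α) (d : PySem.Dict String ν) (q : String) :
    (l.foldl (fun d x => if c x then d.insert (key x) (val x) else d) d).get? q
      = ((l.filter (fun x => c x && key x == q)).getLast?).elim (d.get? q) (fun x => some (val x)) := by
  induction l generalizing d with
  | nil => simp
  | cons x t ih =>
    simp only [List.foldl_cons, List.filter_cons]
    by_cases hc : c x = true
    · rw [if_pos hc]
      by_cases hk : (key x == q) = true
      · have hg : (c x && (key x == q)) = true := by simp [hc, hk]
        rw [if_pos hg, ih, List.getLast?_cons]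
        cases hft : (t.filter (fun x => c x && (key x == q))).getLast? with
        | none =>
          have hq : key x = q := by simpa using hk
          subst hq
          simp [PySem.Dict.get?_insert_self]
        | some y => simp
      · have hg : (c x && (key x == q)) = false := by simp [hk]
        rw [hg, if_neg (by simp), ih]
        have hne : q ≠ key x := by intro h; exact hk (by simp [h])
        rw [PySem.Dict.get?_insert_of_ne _ _ hne]
    · rw [if_neg hc]
      have hg : (c x && (key x == q)) = false := by simp [hc]
      rw [hg, if_neg (by simp), ih]

theorem pv_foldl_no_match {ν β : Type} (t : List (String × ν)) (q : String)
    (f : β → String × ν → β) (init : β)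
    (h : ∀ x ∈ t, (x.1 == q) = false) :
    t.foldl (fun st p => if p.1 == q then f st p else st) init = init := by
  induction t generalizing init with
  | nil => rfl
  | cons p t ih =>
    simp only [List.foldl_cons]
    rw [if_neg (by simp [h p (by simp)]), ih _ (fun x hx => h x (by simp [hx]))]

theorem pv_foldl_unique {ν β : Type} (items : List (String × ν)) (q : String)
    (hnd : (items.map Prod.fst).Nodup) (f : β → String × ν → β) (init : β) :
    items.foldl (fun st p => if p.1 == q then f st p else st) init
      = (items.find? (fun p => p.1 == q)).elim init (fun p => f init p) := by
  induction items with
  | nil => rfl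
  | cons p t ih =>
    simp only [List.foldl_cons, List.find?_cons]
    by_cases hp : (p.1 == q) = true
    · rw [if_pos hp, hp]
      have hq : p.1 = q := by simpa using hp
      have hnm : ∀ x ∈ t, (x.1 == q) = false := by
        intro x hx
        have : p.1 ∉ t.map Prod.fst := (List.nodup_cons.mp (by simpa using hnd)).1
        have hxq : x.1 ≠ q := by
          intro hxe
          exact this (by rw [hq, ← hxe]; exact List.mem_map_of_mem hx)
        simpa using hxq
      rw [pv_foldl_no_match t q f (f init p) hnm]
      rfl
    · rw [if_neg (by simpa using hp)]
      have : (p.1 == q) = false := by simpa using hp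
      rw [this]
      exact ih (by simpa using (List.nodup_cons.mp (by simpa using hnd)).2)


theorem pv_tmp_get (l : List (String × String)) (q' : String) :
    ((l.map Prod.fst).foldl (fun d k => d.insert (pvNorm k) k) (PySem.Dict.mk ([] : List (String × String)))).get? q'
      = (pvRep q' l).map Prod.fst := by
  have hcong : (l.map Prod.fst).foldl (fun d k => d.insert (pvNorm k) k) (PySem.Dict.mk ([] : List (String × String))) =
      (l.map Prod.fst).foldl (fun d k => if (fun _ : String => true) k then d.insert (pvNorm k) ((fun k => k) k) else d) (PySem.Dict.mk []) :=
    PySem.List.foldl_congr_mem _ _ _ _ (by intro acc x hx; simp)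
  rw [hcong, pv_get?_foldl_insert]
  have hfe : (l.map Prod.fst).filter (fun x => (fun _ : String => true) x && (pvNorm x == q'))
      = (l.filter (fun kv => pvNorm kv.1 == q')).map Prod.fst := by
    rw [List.filter_map]
    rfl
  rw [hfe, List.getLast?_map]
  unfold pvRep
  cases (l.filter (fun kv => pvNorm kv.1 == q')).getLast? with
  | none => rfl
  | some e => rfl

theorem pv_pull_eq (key : String) (l : List (String × String)) (hnd : (l.map Prod.fst).Nodup) :
    pull_value_from_student_properties key l =
      ((pvRep (pvNorm key) l).elim ((none : Option String), l)
        (fun e => (some (pvClean e.2), l.filter (fun kv => !(kv.1 == e.1))))) := by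
  unfold pull_value_from_student_properties
  dsimp only
  simp only [PySem.Dict.keys_mk]
  set q := pvNorm key with hq
  set tmp : PySem.Dict String String :=
    ((l.map (fun x => x.1)).foldl (fun d k => d.insert (pvNorm k) k) (PySem.Dict.mk [])) with htmp
  have htg : tmp.get? q = (pvRep q l).map Prod.fst := by
    rw [htmp]; exact pv_tmp_get l q
  have htnd : tmp.keys.Nodup := by
    rw [htmp]
    exact PySem.Dict.nodup_keys_foldl_insert_key (l.map (fun x => x.1)) pvNorm (fun _ k => k)
      (PySem.Dict.mk []) (by simp [PySem.Dict.keys])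
  have hitemsnd : (tmp.items.map Prod.fst).Nodup := by
    simpa [PySem.Dict.keys] using htnd
  rw [pv_foldl_unique tmp.items q hitemsnd
      (fun st tkv => (some (pvClean ((st.2.get? tkv.2).getD "")), st.2.erase tkv.2))
      ((none : Option String), PySem.Dict.mk l)]
  cases hrep : pvRep q l with
  | none =>
    have : tmp.get? q = none := by rw [htg, hrep]; rfl
    have hf : tmp.items.find? (fun p => p.1 == q) = none := by
      unfold PySem.Dict.get? at this
      exact Option.map_eq_none_iff.mp this
    rw [hf]
    rfl
  | some e =>
    have hsome : tmp.get? q = some e.1 := by rw [htg, hrep]; rfl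
    unfold PySem.Dict.get? at hsome
    cases hf : tmp.items.find? (fun p => p.1 == q) with
    | none => rw [hf] at hsome; simp at hsome
    | some tkv =>
      rw [hf] at hsome
      have htv : tkv.2 = e.1 := by simpa using hsome
      have hel : e ∈ l := by
        have hrep' : (List.filter (fun kv => pvNorm kv.1 == q) l).getLast? = some e := hrep
        have := List.mem_of_getLast? hrep'
        exact (List.mem_filter.mp this).1
      have hgl : (PySem.Dict.mk l).get? e.1 = some e.2 := by
        apply PySem.Dict.get?_of_mem_items
        · show (e.1, e.2) ∈ l
          simpa using hel
        · simpa [PySem.Dict.keys] using hnd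
      simp only [Option.elim, htv, hgl]
      rfl

theorem pv_contains_add (s : PySem.Set String) (x y : String) :
    (PySem.Set.add s x).contains y = (s.contains y || y == x) := by
  unfold PySem.Set.add
  by_cases h : s.contains x = true
  · rw [if_pos h]
    apply Bool.eq_iff_iff.mpr
    show PySem.Set.contains s y = true ↔ _
    unfold PySem.Set.contains at h ⊢
    simp only [Bool.or_eq_true]
    constructor
    · exact Or.inl
    · rintro (hy | hy)
      · exact hy
      · have : y = x := by simpa using hy
        rw [this]
        exact h
  · rw [if_neg h]
    apply Bool.eq_iff_iff.mpr
    show List.contains (s ++ [x]) y = true ↔ _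
    unfold PySem.Set.contains
    simp

theorem pv_filter_keys_nodup (l : List (String × String)) (c : String × String → Bool)
    (hnd : (l.map Prod.fst).Nodup) : ((l.filter c).map Prod.fst).Nodup :=
  List.Nodup.sublist (List.Sublist.map Prod.fst List.filter_sublist) hnd

theorem pv_rep_filter (p : String) (l : List (String × String)) (R : PySem.Set String)
    (h : ∀ kv ∈ l, pvNorm kv.1 = p → R.contains kv.1 = false) :
    pvRep p (l.filter (fun kv => !(PySem.Set.contains R kv.1))) = pvRep p l := by
  unfold pvRep
  rw [List.filter_filter]
  refine congrArg List.getLast? (List.filter_congr ?_)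
  intro kv hkv
  by_cases hn : pvNorm kv.1 = p
  · have hc := h kv hkv hn
    simp only [hn]
    simp only [PySem.Set.contains] at hc
    simp
    simpa using hc
  · simp [hn]

def pvFoldB (l0 : List (String × String)) (P : List String) (init : String × PySem.Set String) :
    String × PySem.Set String :=
  P.foldl
    (fun acc p =>
      match pvRep p l0 with
      | some kv =>
          let cv := pvClean kv.2
          if cv ≠ "" then (cv, PySem.Set.add acc.2 kv.1) else acc
      | none => acc)
    init

set_option maxHeartbeats 2000000 in
theorem pv_main (P : List String) (l0 : List (String × String)) :
    ∀ (R : PySem.Set String) (v : String),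
      (l0.map Prod.fst).Nodup → P.Nodup → (∀ p ∈ P, pvNorm p = p) →
      (∀ kv ∈ l0, R.contains kv.1 = true → pvNorm kv.1 ∉ P) →
      P.foldl
        (fun (st : String × List (String × String)) prop =>
          let res := pull_value_from_student_properties prop st.2
          match res.1 with
          | some nv => if nv ≠ "" then (nv, res.2) else st
          | none => st)
        (v, l0.filter (fun kv => !(PySem.Set.contains R kv.1))) =
      ((pvFoldB l0 P (v, R)).1,
       l0.filter (fun kv => !(PySem.Set.contains (pvFoldB l0 P (v, R)).2 kv.1))) := by
  induction P with
  | nil => intro R v _ _ _ _; rfl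
  | cons p P ih =>
    intro R v hnd hndP hnorm hR
    have hlcnd := pv_filter_keys_nodup l0 (fun kv => !(PySem.Set.contains R kv.1)) hnd
    have hrep_eq : pvRep p (l0.filter (fun kv => !(PySem.Set.contains R kv.1))) = pvRep p l0 := by
      apply pv_rep_filter
      intro kv hkv hn
      by_contra hc
      have hc' : R.contains kv.1 = true := by
        cases h : R.contains kv.1
        · exact absurd h hc
        · rfl
      exact (hR kv hkv hc') (by rw [hn]; exact List.mem_cons_self)
    rw [List.foldl_cons]
    dsimp only
    rw [pv_pull_eq p _ hlcnd, hnorm p List.mem_cons_self, hrep_eq]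
    cases hrep : pvRep p l0 with
    | none =>
      dsimp only [Option.elim]
      have hfb : pvFoldB l0 (p :: P) (v, R) = pvFoldB l0 P (v, R) := by
        unfold pvFoldB
        rw [List.foldl_cons]
        dsimp only
        rw [hrep]
      rw [hfb]
      exact ih R v hnd (List.nodup_cons.mp hndP).2
        (fun q hq => hnorm q (List.mem_cons_of_mem _ hq))
        (fun kv hkv hc => fun hm => (hR kv hkv hc) (List.mem_cons_of_mem _ hm))
    | some e =>
      dsimp only [Option.elim]
      have hne : pvNorm e.1 = p := by
        have hrep' : (List.filter (fun kv => pvNorm kv.1 == p) l0).getLast? = some e := hrep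
        have := (List.mem_filter.mp (List.mem_of_getLast? hrep')).2
        simpa using this
      by_cases hcv : pvClean e.2 = ""
      · rw [if_neg (by simpa using hcv)]
        have hfb : pvFoldB l0 (p :: P) (v, R) = pvFoldB l0 P (v, R) := by
          unfold pvFoldB
          rw [List.foldl_cons]
          dsimp only
          rw [hrep]
          dsimp only
          rw [if_neg (by simpa using hcv)]
        rw [hfb]
        exact ih R v hnd (List.nodup_cons.mp hndP).2
          (fun q hq => hnorm q (List.mem_cons_of_mem _ hq))
          (fun kv hkv hc => fun hm => (hR kv hkv hc) (List.mem_cons_of_mem _ hm))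
      · rw [if_pos hcv]
        have hfilt : (l0.filter (fun kv => !(PySem.Set.contains R kv.1))).filter
              (fun kv => !(kv.1 == e.1))
            = l0.filter (fun kv => !(PySem.Set.contains (PySem.Set.add R e.1) kv.1)) := by
          rw [List.filter_filter]
          apply List.filter_congr
          intro kv _
          show (!(kv.1 == e.1) && !(PySem.Set.contains R kv.1)) = _
          rw [pv_contains_add]
          rw [Bool.not_or, Bool.and_comm]
        rw [hfilt]
        have hfb : pvFoldB l0 (p :: P) (v, R) = pvFoldB l0 P (pvClean e.2, PySem.Set.add R e.1) := by
          unfold pvFoldB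
          rw [List.foldl_cons]
          dsimp only
          rw [hrep]
          dsimp only
          rw [if_pos hcv]
        rw [hfb]
        apply ih (PySem.Set.add R e.1) (pvClean e.2) hnd (List.nodup_cons.mp hndP).2
          (fun q hq => hnorm q (List.mem_cons_of_mem _ hq))
        intro kv hkv hc hm
        rw [pv_contains_add] at hc
        cases ho : R.contains kv.1 with
        | true => exact (hR kv hkv ho) (List.mem_cons_of_mem _ hm)
        | false =>
          rw [ho] at hc
          simp at hc
          have : pvNorm kv.1 = p := by rw [hc, hne]
          exact (List.nodup_cons.mp hndP).1 (this ▸ hm)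

set_option maxHeartbeats 1000000 in
theorem pv_slots_get (sp : List (String × String)) (p : String) (hp : p ∈ pvPropsB) :
    (sp.foldl
      (fun d kv =>
        let nk := pvNorm kv.1
        if pvPropsB.contains nk then d.insert nk kv else d)
      (PySem.Dict.mk [])).get? p = pvRep p sp := by
  have hstep : sp.foldl
      (fun d kv =>
        let nk := pvNorm kv.1
        if pvPropsB.contains nk then d.insert nk kv else d)
      (PySem.Dict.mk []) =
    sp.foldl
      (fun d kv =>
        if (fun kv : String × String => pvPropsB.contains (pvNorm kv.1)) kv
        then d.insert ((fun kv : String × String => pvNorm kv.1) kv) ((fun kv : String × String => kv) kv) else d)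
      (PySem.Dict.mk []) := rfl
  rw [hstep, pv_get?_foldl_insert]
  have hfe : sp.filter (fun kv => (fun kv : String × String => pvPropsB.contains (pvNorm kv.1)) kv
        && ((fun kv : String × String => pvNorm kv.1) kv == p))
      = sp.filter (fun kv => pvNorm kv.1 == p) := by
    apply List.filter_congr
    intro kv _
    by_cases hn : pvNorm kv.1 = p
    · simp [hn, hp]
    · simp [hn]
  rw [hfe]
  unfold pvRep
  cases (sp.filter (fun kv => pvNorm kv.1 == p)).getLast? with
  | none => rfl
  | some e => rfl

set_option maxHeartbeats 1000000 in
theorem pv_final (course : String) (sp : List (String × String))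
    (hnd : (sp.map Prod.fst).Nodup) :
    update_course_and_student_properties course sp = update_course_and_student_properties_alt course sp := by
  unfold update_course_and_student_properties update_course_and_student_properties_alt
  dsimp only
  have hsp : sp.filter (fun kv => !(PySem.Set.contains (PySem.Set.ofList []) kv.1)) = sp := by
    simp [PySem.Set.ofList, PySem.Set.empty, PySem.Set.contains]
  have hmain := pv_main pvPropsB sp (PySem.Set.ofList []) course hnd
    (by unfold pvPropsB; decide)
    (by unfold pvPropsB; decide)
    (by
      intro kv hkv hc
      simp [PySem.Set.ofList, PySem.Set.empty, PySem.Set.contains] at hc)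
  rw [hsp] at hmain
  have hA : ["course", "courses", "course_title", "course title",
             "course_name", "course name", "coursename", "othercourse"] = pvPropsB := rfl
  rw [hA, hmain]
  have hcong : pvPropsB.foldl
      (fun (acc : String × PySem.Set String) p =>
        match (sp.foldl
          (fun d kv =>
            let nk := pvNorm kv.1
            if pvPropsB.contains nk then d.insert nk kv else d)
          (PySem.Dict.mk [])).get? p with
        | some kv =>
            let cv := pvClean kv.2
            if cv ≠ "" then (cv, PySem.Set.add acc.2 kv.1) else acc
        | none => acc)
      (course, PySem.Set.ofList []) = pvFoldB sp pvPropsB (course, PySem.Set.ofList []) := by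
    unfold pvFoldB
    apply PySem.List.foldl_congr_mem
    intro acc p hp
    rw [pv_slots_get sp p hp]
  rw [hcong]

-- ===== VERDICT (by name: the statement is the Claim_ definition above) =====
theorem update_course_and_student_properties_spec : Claim_equal_update_course_and_student_properties := by
  intro course student_properties _ hpre
  unfold Pre_update_course_and_student_properties at hpre
  unfold Spec_update_course_and_student_properties
  exact pv_final course student_properties hpre
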